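-- pv_equiv track=rewrite | github.com/KangPvP/TakazuPy | ProjetTakuzu/takuzu_1NSI_eleve.py | resolution_takuzu
-- ===== SOURCE A (Python) =====
-- def ligne_valide(grille, ligne):
--     for i in range(len(grille)):
--         if grille[ligne][i] == 9:
--             continue
--         if grille[ligne].count(grille[ligne][i]) > len(grille) // 2:
--             return False
--     return True
--
-- def colonne_valide(grille, colonne):
--     colonne_data = [grille[i][colonne] for i in range(len(grille))]
--     for i in range(len(grille)):
--         if colonne_data[i] == 9:
--             continue
--         if colonne_data.count(colonne_data[i]) > len(grille) // 2:
--             return False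
--     return True
--
-- def est_valide(grille):
--     for i in range(len(grille)):
--         if not ligne_valide(grille, i) or not colonne_valide(grille, i):
--             return False
--     return True
--
-- def ligne_est_unique(grille, ligne):
--     for i in range(len(grille)):
--         if grille[ligne][i] == 9:
--             continue
--         if grille[ligne].count(grille[ligne][i]) != 1:
--             return False
--     return True
--
-- def resolution_takuzu(grille, ligne=0, colonne=0):
--     if ligne == len(grille):
--         return grille if est_valide(grille) else None
--
--     next_ligne = ligne + 1 if colonne == len(grille) - 1 else ligne
--     next_colonne = 0 if colonne == len(grille) - 1 else colonne + 1
--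
--     if grille[ligne][colonne] == 9:
--         for i in range(2):
--             grille[ligne][colonne] = i
--             if (ligne_valide(grille, ligne) and colonne_valide(grille, colonne) and
--                     (colonne == len(grille) - 1 or ligne == len(grille) - 1 or ligne_est_unique(grille, ligne))):
--                 result = resolution_takuzu(grille, next_ligne, next_colonne)
--                 if result:
--                     return result
--         grille[ligne][colonne] = 9
--     else:
--         return resolution_takuzu(grille, next_ligne, next_colonne)
--
--     return None
-- ===== SOURCE B (Python) =====
-- def ligne_valide(grille, ligne):
--     for i in range(len(grille)):
--         if grille[ligne][i] == 9:
--             continue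
--         if grille[ligne].count(grille[ligne][i]) > len(grille) // 2:
--             return False
--     return True
--
-- def colonne_valide(grille, colonne):
--     colonne_data = [grille[i][colonne] for i in range(len(grille))]
--     for i in range(len(grille)):
--         if colonne_data[i] == 9:
--             continue
--         if colonne_data.count(colonne_data[i]) > len(grille) // 2:
--             return False
--     return True
--
-- def est_valide(grille):
--     for i in range(len(grille)):
--         if not ligne_valide(grille, i) or not colonne_valide(grille, i):
--             return False
--     return True
--
-- def ligne_est_unique(grille, ligne):
--     for i in range(len(grille)):
--         if grille[ligne][i] == 9:
--             continue
--         if grille[ligne].count(grille[ligne][i]) != 1: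
--             return False
--     return True
--
-- def resolution_takuzu(grille, ligne=0, colonne=0):
--     # B: collect the empty cells once, then backtrack over that list only
--     # (mutates grille in place like A does).
--     n = len(grille)
--     if ligne == n:
--         return grille if est_valide(grille) else None
--     empties = []
--     l, c = ligne, colonne
--     while l != n:
--         if grille[l][c] == 9:
--             empties.append((l, c))
--         if c == n - 1:
--             l, c = l + 1, 0
--         else:
--             c = c + 1
--     def solve(k):
--         if k == len(empties):
--             return grille if est_valide(grille) else None
--         fl, fc = empties[k]
--         for v in (0, 1):
--             grille[fl][fc] = v
--             if (ligne_valide(grille, fl) and colonne_valide(grille, fc) and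
--                     (fc == n - 1 or fl == n - 1 or ligne_est_unique(grille, fl))):
--                 result = solve(k + 1)
--                 if result is not None:
--                     return result
--         grille[fl][fc] = 9
--         return None
--     return solve(0)
-- ===== Notes on version B (the rewrite author's own statement) =====
-- stated objective: alternative
-- what changed: B collects the positions of the empty cells in one pass and backtracks over that precomputed list, instead of A's cell-by-cell recursion that re-walks the grid and skips pre-filled cells at every recursion level.
-- outside the precondition, e.g. on resolution_takuzu([[9, 0], [1]], 0, 0): A returns None, B raises IndexError
import Mathlib
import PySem

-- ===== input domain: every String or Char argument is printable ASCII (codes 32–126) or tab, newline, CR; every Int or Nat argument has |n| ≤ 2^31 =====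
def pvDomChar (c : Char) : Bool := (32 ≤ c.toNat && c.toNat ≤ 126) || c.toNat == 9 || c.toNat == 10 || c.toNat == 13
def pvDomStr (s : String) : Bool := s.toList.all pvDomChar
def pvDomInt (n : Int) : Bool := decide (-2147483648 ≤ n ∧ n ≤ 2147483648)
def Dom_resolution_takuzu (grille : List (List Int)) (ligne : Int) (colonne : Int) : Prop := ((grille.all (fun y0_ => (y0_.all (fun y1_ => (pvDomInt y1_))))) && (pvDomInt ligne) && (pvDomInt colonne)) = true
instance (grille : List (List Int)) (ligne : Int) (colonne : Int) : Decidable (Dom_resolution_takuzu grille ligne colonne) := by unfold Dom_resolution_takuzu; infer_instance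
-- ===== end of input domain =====

-- B replaces A's cell-by-cell recursion (which revisits and skips pre-filled cells at
-- every level) by collecting the empty cells once and backtracking over that list only;
-- both Pythons mutate `grille` in place the same way, the theorems are about the return value.

-- ===== PORT A =====
-- shared helpers (both Pythons use the identical module helpers)
-- grille[l]  (default [] only outside Pre_, where Python raises)
def rowOf (g : List (List Int)) (l : Int) : List Int := PySem.List.pyGetD g l []

-- grille[l][i] == 9 ? / count-based row check; exact on Pre_ (in-range indices)
def ligne_valide (g : List (List Int)) (l : Int) : Bool :=
  (PySem.List.pyRange 0 (g.length : Int) 1).all (fun i =>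
    let x := PySem.List.pyGetD (rowOf g l) i 0
    x == 9 || !(decide (PySem.Int.floordiv (g.length : Int) 2 < (PySem.List.count (rowOf g l) x : Int))))

def colonne_valide (g : List (List Int)) (c : Int) : Bool :=
  let colonne_data := (PySem.List.pyRange 0 (g.length : Int) 1).map (fun i =>
    PySem.List.pyGetD (rowOf g i) c 0)
  (PySem.List.pyRange 0 (g.length : Int) 1).all (fun i =>
    let x := PySem.List.pyGetD colonne_data i 0
    x == 9 || !(decide (PySem.Int.floordiv (g.length : Int) 2 < (PySem.List.count colonne_data x : Int))))

def est_valide (g : List (List Int)) : Bool :=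
  (PySem.List.pyRange 0 (g.length : Int) 1).all (fun i =>
    ligne_valide g i && colonne_valide g i)

def ligne_est_unique (g : List (List Int)) (l : Int) : Bool :=
  (PySem.List.pyRange 0 (g.length : Int) 1).all (fun i =>
    let x := PySem.List.pyGetD (rowOf g l) i 0
    x == 9 || PySem.List.count (rowOf g l) x == 1)

-- grille[l][c] = v   (functional update; exact on Pre_)
def setCell (g : List (List Int)) (l c : Int) (v : Int) : List (List Int) :=
  PySem.List.pySetD g l (PySem.List.pySetD (rowOf g l) c v)

-- Python's `if result:` on an Option-of-list result ([] and None are falsy)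
def pyTruthy (r : Option (List (List Int))) : Option (List (List Int)) :=
  match r with
  | some x => if x.isEmpty then none else some x
  | none => none

-- A's recursion, fuelled (the fuel is a totality guard only: on Pre_ the
-- recursion depth is ≤ len(grille)^2 + 1, below the fuel the wrapper passes)
def solveA : Nat → List (List Int) → Int → Int → Option (List (List Int))
  | 0, _, _, _ => none
  | f+1, g, l, c =>
    let n : Int := (g.length : Int)
    if l = n then (if est_valide g then some g else none)
    else
      let nl := if c = n - 1 then l + 1 else l
      let nc := if c = n - 1 then 0 else c + 1
      if PySem.List.pyGetD (rowOf g l) c 0 = 9 then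
        let g0 := setCell g l c 0
        let r0 := if ligne_valide g0 l && colonne_valide g0 c &&
                     (decide (c = n - 1) || decide (l = n - 1) || ligne_est_unique g0 l)
                  then solveA f g0 nl nc else none
        match pyTruthy r0 with
        | some r => some r
        | none =>
          let g1 := setCell g l c 1
          let r1 := if ligne_valide g1 l && colonne_valide g1 c &&
                       (decide (c = n - 1) || decide (l = n - 1) || ligne_est_unique g1 l)
                    then solveA f g1 nl nc else none
          match pyTruthy r1 with
          | some r => some r
          | none => none
      else solveA f g nl nc

def resolution_takuzu (grille : List (List Int)) (ligne : Int) (colonne : Int) : Option (List (List Int)) :=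
  solveA (grille.length * grille.length + 2) grille ligne colonne

-- ===== PORT B =====
-- B's first pass: collect the positions of the empty cells from (l,c) on, row-major
-- (fuelled totality guard; on Pre_ the walk makes ≤ len(grille)^2 steps)
def collectEmpties : Nat → List (List Int) → Int → Int → List (Int × Int)
  | 0, _, _, _ => []
  | f+1, g, l, c =>
    let n : Int := (g.length : Int)
    if l = n then []
    else
      let nl := if c = n - 1 then l + 1 else l
      let nc := if c = n - 1 then 0 else c + 1
      if PySem.List.pyGetD (rowOf g l) c 0 = 9 then
        (l, c) :: collectEmpties f g nl nc
      else collectEmpties f g nl nc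

-- B's backtracking over the list of empty cells (structural recursion on the list)
def solveB (g : List (List Int)) (cells : List (Int × Int)) : Option (List (List Int)) :=
  match cells with
  | [] => if est_valide g then some g else none
  | (fl, fc) :: rest =>
    let n : Int := (g.length : Int)
    let g0 := setCell g fl fc 0
    let r0 := if ligne_valide g0 fl && colonne_valide g0 fc &&
                 (decide (fc = n - 1) || decide (fl = n - 1) || ligne_est_unique g0 fl)
              then solveB g0 rest else none
    match r0 with
    | some r => some r
    | none =>
      let g1 := setCell g fl fc 1
      if ligne_valide g1 fl && colonne_valide g1 fc &&
         (decide (fc = n - 1) || decide (fl = n - 1) || ligne_est_unique g1 fl)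
      then solveB g1 rest else none

def resolution_takuzu_alt (grille : List (List Int)) (ligne : Int) (colonne : Int) : Option (List (List Int)) :=
  if ligne = (grille.length : Int) then (if est_valide grille then some grille else none)
  else solveB grille (collectEmpties (grille.length * grille.length + 2) grille ligne colonne)

-- ===== PRECONDITION & SPEC =====
-- Pre_ excludes start positions outside the grid (A raises IndexError), negative start
-- indices (outside the solver's natural domain: where A returns, the value is an accident
-- of Python's negative-index wraparound aliasing rows), and grids with a row shorter than
-- the grid height (A raises IndexError on most of them; where it returns, the value is an
-- accident of which cells the walk happens to read).
def Pre_resolution_takuzu (grille : List (List Int)) (ligne : Int) (colonne : Int) : Prop :=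
  (∀ row ∈ grille, grille.length ≤ row.length) ∧
  (ligne = (grille.length : Int) ∨
    (0 ≤ ligne ∧ ligne < (grille.length : Int) ∧
     0 ≤ colonne ∧ colonne < (grille.length : Int)))
instance (grille : List (List Int)) (ligne : Int) (colonne : Int) : Decidable (Pre_resolution_takuzu grille ligne colonne) := by unfold Pre_resolution_takuzu; infer_instance

def pvWitness_resolution_takuzu : List (List Int) × Int × Int := ([[9, 9], [9, 9]], 0, 0)

def Spec_resolution_takuzu (grille : List (List Int)) (ligne : Int) (colonne : Int) (out : Option (List (List Int))) : Prop := out = resolution_takuzu_alt grille ligne colonne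
instance (grille : List (List Int)) (ligne : Int) (colonne : Int) (out : Option (List (List Int))) : Decidable (Spec_resolution_takuzu grille ligne colonne out) := by unfold Spec_resolution_takuzu; infer_instance

-- ===== CLAIM (what is proved, stated in full; the proofs are below) =====
def Claim_equal_resolution_takuzu : Prop := ∀ (grille : List (List Int)) (ligne : Int) (colonne : Int), Dom_resolution_takuzu grille ligne colonne → Pre_resolution_takuzu grille ligne colonne → Spec_resolution_takuzu grille ligne colonne (resolution_takuzu grille ligne colonne)


-- ===== LEMMAS AND PROOFS =====

-- every row is at least as long as the grid is high (all indexing is then in range)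
def RowsOk (g : List (List Int)) : Prop := ∀ row ∈ g, g.length ≤ row.length

theorem length_setCell (g : List (List Int)) (l c v : Int) :
    (setCell g l c v).length = g.length := by
  simp [setCell, PySem.List.length_pySetD]

theorem setCell_eq_set (g : List (List Int)) (l c v : Int) (hl : 0 ≤ l) (hc : 0 ≤ c) :
    setCell g l c v = g.set l.toNat ((rowOf g l).set c.toNat v) := by
  rw [setCell, PySem.List.pySetD_of_nonneg _ _ hc, PySem.List.pySetD_of_nonneg _ _ hl]

theorem rowOf_eq_getElem (g : List (List Int)) (l : Int) (hl : 0 ≤ l)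
    (hl2 : l < (g.length : Int)) : rowOf g l = g[l.toNat]'(by omega) := by
  rw [rowOf, PySem.List.pyGetD_eq_getElem _ _ hl hl2]

theorem length_rowOf (g : List (List Int)) (l : Int) (hs : RowsOk g) (hl : 0 ≤ l)
    (hl2 : l < (g.length : Int)) : g.length ≤ (rowOf g l).length := by
  rw [rowOf_eq_getElem g l hl hl2]
  exact hs _ (List.getElem_mem _)

theorem rowsOk_setCell (g : List (List Int)) (l c v : Int) (hl : 0 ≤ l) (hc : 0 ≤ c)
    (hl2 : l < (g.length : Int)) (hs : RowsOk g) : RowsOk (setCell g l c v) := by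
  intro row hrow
  rw [length_setCell]
  rw [setCell_eq_set g l c v hl hc] at hrow
  rcases List.mem_or_eq_of_mem_set hrow with h | h
  · exact hs row h
  · subst h
    rw [List.length_set]
    exact length_rowOf g l hs hl hl2

theorem rowOf_setCell_self (g : List (List Int)) (l c v : Int)
    (hl : 0 ≤ l) (hl2 : l < (g.length : Int)) (hc : 0 ≤ c) :
    rowOf (setCell g l c v) l = (rowOf g l).set c.toNat v := by
  rw [setCell_eq_set g l c v hl hc]
  rw [rowOf_eq_getElem _ l hl (by simpa using hl2)]
  simp

theorem rowOf_setCell_other (g : List (List Int)) (l c v l' : Int) (hl : 0 ≤ l) (hc : 0 ≤ c)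
    (hl' : 0 ≤ l') (hl2' : l' < (g.length : Int)) (hne : l ≠ l') :
    rowOf (setCell g l c v) l' = rowOf g l' := by
  rw [setCell_eq_set g l c v hl hc]
  rw [rowOf_eq_getElem _ l' hl' (by simpa using hl2'), rowOf_eq_getElem g l' hl' hl2']
  rw [List.getElem_set]
  simp only [ite_eq_right_iff]
  intro h
  exact absurd (by omega : l = l') hne

theorem gc_setCell_ne (g : List (List Int)) (l c v l' c' : Int) (hs : RowsOk g)
    (hl : 0 ≤ l) (hl2 : l < (g.length : Int)) (hc : 0 ≤ c)
    (hl' : 0 ≤ l') (hl2' : l' < (g.length : Int)) (hc' : 0 ≤ c') (hc2' : c' < (g.length : Int))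
    (hne : l ≠ l' ∨ c ≠ c') :
    PySem.List.pyGetD (rowOf (setCell g l c v) l') c' 0 =
    PySem.List.pyGetD (rowOf g l') c' 0 := by
  by_cases hll : l = l'
  · subst hll
    have hcc : c ≠ c' := by tauto
    have hrl := length_rowOf g l hs hl hl2
    rw [rowOf_setCell_self g l c v hl hl2 hc]
    rw [PySem.List.pyGetD_eq_getElem _ _ hc' (by rw [List.length_set]; omega)]
    rw [PySem.List.pyGetD_eq_getElem _ _ hc' (by omega)]
    rw [List.getElem_set]
    simp only [ite_eq_right_iff]
    intro h
    exact absurd (by omega : c = c') hcc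
  · rw [rowOf_setCell_other g l c v l' hl hc hl' hl2' hll]

theorem pyTruthy_eq_some (o : Option (List (List Int))) (r : List (List Int))
    (h : pyTruthy o = some r) : o = some r := by
  cases o with
  | none => simp [pyTruthy] at h
  | some x =>
    by_cases hx : x.isEmpty
    · simp [pyTruthy, hx] at h
    · simpa [pyTruthy, hx] using h

theorem pyTruthy_id (o : Option (List (List Int)))
    (h : ∀ r, o = some r → r.isEmpty = false) : pyTruthy o = o := by
  cases o with
  | none => rfl
  | some x => simp [pyTruthy, h x rfl]

theorem match2_eq_some (a b : Option (List (List Int))) (r : List (List Int))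
    (h : (match pyTruthy a with
          | some x => some x
          | none => match pyTruthy b with | some x => some x | none => none) = some r) :
    a = some r ∨ b = some r := by
  rcases ha : pyTruthy a with _ | x
  · rw [ha] at h
    rcases hb : pyTruthy b with _ | y
    · rw [hb] at h
      exact absurd h (by simp)
    · rw [hb] at h
      simp only [Option.some.injEq] at h
      subst h
      exact Or.inr (pyTruthy_eq_some _ _ hb)
  · rw [ha] at h
    simp only [Option.some.injEq] at h
    subst h
    exact Or.inl (pyTruthy_eq_some _ _ ha)

theorem len_solveA : ∀ (f : Nat) (g : List (List Int)) (l c : Int) (r : List (List Int)),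
    solveA f g l c = some r → r.length = g.length := by
  intro f
  induction f with
  | zero => intro g l c r h; simp [solveA] at h
  | succ f ih =>
    intro g l c r h
    simp only [solveA] at h
    by_cases h1 : l = (g.length : Int)
    · rw [if_pos h1] at h
      split_ifs at h
      rw [← Option.some.inj h]
    · rw [if_neg h1] at h
      by_cases h9 : PySem.List.pyGetD (rowOf g l) c 0 = 9
      · rw [if_pos h9] at h
        rcases match2_eq_some _ _ _ h with hA | hB
        · split_ifs at hA
          all_goals (have := ih _ _ _ _ hA; rwa [length_setCell] at this)
        · split_ifs at hB
          all_goals (have := ih _ _ _ _ hB; rwa [length_setCell] at this)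
      · rw [if_neg h9] at h
        exact ih _ _ _ _ h

theorem collect_end (f : Nat) (g : List (List Int)) (c : Int) (hf : 1 ≤ f) :
    collectEmpties f g (g.length : Int) c = [] := by
  cases f with
  | zero => omega
  | succ f => rw [collectEmpties]; simp

theorem collect_setCell : ∀ (f : Nat) (g : List (List Int)) (l c v l2 c2 : Int),
    RowsOk g → 0 ≤ l → l < (g.length:Int) → 0 ≤ c → c < (g.length:Int) →
    0 ≤ l2 → l2 ≤ (g.length:Int) → 0 ≤ c2 → c2 < (g.length:Int) →
    (l < l2 ∨ (l = l2 ∧ c < c2)) →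
    collectEmpties f (setCell g l c v) l2 c2 = collectEmpties f g l2 c2 := by
  intro f
  induction f with
  | zero => intros; rfl
  | succ f ih =>
    intro g l c v l2 c2 hs hl hl2 hc hc2 hl0 hl02 hc0 hc02 hafter
    simp only [collectEmpties, length_setCell]
    by_cases hend : l2 = (g.length:Int)
    · simp [hend]
    · have hl2n : l2 < (g.length:Int) := by omega
      have hne : l ≠ l2 ∨ c ≠ c2 := by omega
      rw [if_neg hend, if_neg hend,
        gc_setCell_ne g l c v l2 c2 hs hl hl2 hc hl0 hl2n hc0 hc02 hne]
      have hrec : collectEmpties f (setCell g l c v)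
            (if c2 = (g.length:Int) - 1 then l2 + 1 else l2)
            (if c2 = (g.length:Int) - 1 then 0 else c2 + 1) =
          collectEmpties f g (if c2 = (g.length:Int) - 1 then l2 + 1 else l2)
            (if c2 = (g.length:Int) - 1 then 0 else c2 + 1) := by
        by_cases hlast : c2 = (g.length:Int) - 1
        · simp only [if_pos hlast]
          exact ih g l c v (l2+1) 0 hs hl hl2 hc hc2 (by omega) (by omega) (by omega) (by omega) (by omega)
        · simp only [if_neg hlast]
          exact ih g l c v l2 (c2+1) hs hl hl2 hc hc2 (by omega) (by omega) (by omega) (by omega) (by omega)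
      rw [hrec]

theorem main_solve : ∀ (f : Nat) (g : List (List Int)) (l c : Int),
    RowsOk g →
    (l = (g.length:Int) ∨
      (0 ≤ l ∧ l < (g.length:Int) ∧ 0 ≤ c ∧ c < (g.length:Int))) →
    1 ≤ f → g.length * g.length + 2 ≤ l.toNat * g.length + c.toNat + f →
    solveA f g l c =
      (if l = (g.length:Int) then (if est_valide g then some g else none)
       else solveB g (collectEmpties f g l c)) := by
  intro f
  induction f with
  | zero => intro g l c _ _ hf _; omega
  | succ f ih =>
    intro g l c hs hlc hf hfuel
    by_cases hend : l = (g.length:Int)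
    · rw [if_pos hend, solveA, if_pos hend]
    · obtain ⟨hl, hlt, hc, hcl⟩ := hlc.resolve_left hend
      have hpos : 0 < g.length := by omega
      have hf3 : 3 ≤ f + 1 := by
        obtain ⟨m, hm⟩ : ∃ m, g.length = m + 1 := ⟨g.length - 1, by omega⟩
        have h3 : l.toNat * g.length ≤ m * g.length := Nat.mul_le_mul_right _ (by omega)
        have h4 : m * g.length + g.length = g.length * g.length := by rw [hm]; ring
        omega
      have key : ∀ (g' : List (List Int)), RowsOk g' → g'.length = g.length →
          solveA f g' (if c = (g.length:Int) - 1 then l + 1 else l)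
            (if c = (g.length:Int) - 1 then 0 else c + 1) =
          solveB g' (collectEmpties f g' (if c = (g.length:Int) - 1 then l + 1 else l)
            (if c = (g.length:Int) - 1 then 0 else c + 1)) := by
        intro g' hs' hlen
        by_cases hlast : c = (g.length:Int) - 1
        · simp only [if_pos hlast]
          rw [ih g' (l+1) 0 hs' (by rw [hlen]; omega) (by omega)
            (by rw [hlen]
                have hL : (l+1).toNat = l.toNat + 1 := by omega
                rw [hL, Nat.succ_mul]
                omega)]
          by_cases hnl : l + 1 = (g.length:Int)
          · rw [if_pos (by rw [hlen]; omega : l + 1 = (g'.length:Int))]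
            have hcast : l + 1 = ((g'.length : Nat) : Int) := by rw [hlen]; omega
            rw [hcast, collect_end f g' 0 (by omega)]
            simp only [solveB]
          · rw [if_neg (by rw [hlen]; omega : ¬ l + 1 = (g'.length:Int))]
        · simp only [if_neg hlast]
          rw [ih g' l (c+1) hs' (by rw [hlen]; omega) (by omega)
            (by rw [hlen]
                have hC : (c+1).toNat = c.toNat + 1 := by omega
                rw [hC]
                omega)]
          rw [if_neg (by rw [hlen]; omega : ¬ l = (g'.length:Int))]
      simp only [solveA, collectEmpties]
      rw [if_neg hend, if_neg hend, if_neg hend]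
      by_cases hcell : PySem.List.pyGetD (rowOf g l) c 0 = 9
      · rw [if_pos hcell, if_pos hcell]
        have hsq0 := rowsOk_setCell g l c 0 hl hc hlt hs
        have hsq1 := rowsOk_setCell g l c 1 hl hc hlt hs
        have hcs : ∀ v : Int, collectEmpties f (setCell g l c v)
              (if c = (g.length:Int) - 1 then l + 1 else l)
              (if c = (g.length:Int) - 1 then 0 else c + 1) =
            collectEmpties f g (if c = (g.length:Int) - 1 then l + 1 else l)
              (if c = (g.length:Int) - 1 then 0 else c + 1) := by
          intro v
          by_cases hlast : c = (g.length:Int) - 1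
          · simp only [if_pos hlast]
            exact collect_setCell f g l c v (l+1) 0 hs hl hlt hc hcl (by omega) (by omega)
              (by omega) (by omega) (by omega)
          · simp only [if_neg hlast]
            exact collect_setCell f g l c v l (c+1) hs hl hlt hc hcl (by omega) (by omega)
              (by omega) (by omega) (by omega)
        have hkey0 := key (setCell g l c 0) hsq0 (length_setCell g l c 0)
        have hkey1 := key (setCell g l c 1) hsq1 (length_setCell g l c 1)
        rw [hcs 0] at hkey0
        rw [hcs 1] at hkey1
        have htr : ∀ (g' : List (List Int)), g'.length = g.length → ∀ (C : Bool),
            pyTruthy (if C then solveA f g'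
                (if c = (g.length:Int) - 1 then l + 1 else l)
                (if c = (g.length:Int) - 1 then 0 else c + 1) else none) =
            (if C then solveA f g'
                (if c = (g.length:Int) - 1 then l + 1 else l)
                (if c = (g.length:Int) - 1 then 0 else c + 1) else none) := by
          intro g' hlen C
          apply pyTruthy_id
          intro r hr
          split_ifs at hr
          all_goals
            have hlen2 := len_solveA _ _ _ _ _ hr
            rw [hlen] at hlen2
            rcases r with _ | ⟨x, xs⟩
            · rw [List.length_nil] at hlen2
              exact absurd hlen2 (by omega)
            · rfl
        rw [htr (setCell g l c 0) (length_setCell g l c 0),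
          htr (setCell g l c 1) (length_setCell g l c 1), hkey0, hkey1]
        simp only [solveB]
        generalize (if (ligne_valide (setCell g l c 0) l && colonne_valide (setCell g l c 0) c &&
              (decide (c = (g.length:Int) - 1) || decide (l = (g.length:Int) - 1) || ligne_est_unique (setCell g l c 0) l)) = true
            then solveB (setCell g l c 0) (collectEmpties f g (if c = (g.length:Int) - 1 then l + 1 else l)
              (if c = (g.length:Int) - 1 then 0 else c + 1)) else none) = a0
        generalize (if (ligne_valide (setCell g l c 1) l && colonne_valide (setCell g l c 1) c &&
              (decide (c = (g.length:Int) - 1) || decide (l = (g.length:Int) - 1) || ligne_est_unique (setCell g l c 1) l)) = true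
            then solveB (setCell g l c 1) (collectEmpties f g (if c = (g.length:Int) - 1 then l + 1 else l)
              (if c = (g.length:Int) - 1 then 0 else c + 1)) else none) = a1
        rcases a0 with _ | r0
        · rcases a1 with _ | r1 <;> rfl
        · rfl
      · rw [if_neg hcell, if_neg hcell]
        exact key g hs rfl

-- ===== VERDICT (by name: the statement is the Claim_ definition above) =====
theorem resolution_takuzu_spec : Claim_equal_resolution_takuzu := by
  intro g l c _hd hpre
  obtain ⟨hrows, hlc⟩ := hpre
  exact main_solve (g.length * g.length + 2) g l c hrows hlc (by omega) (by omega)
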